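-- pv_equiv track=rewrite | github.com/hackthelock/Light-Morse-Code-Reader | main.py | map_durations_to_morse
-- ===== SOURCE A (Python) =====
-- def map_durations_to_morse(light_times, dark_times, light_thresholds, dark_thresholds):
--
--     symbols = []
--
--     for i, light_duration in enumerate(light_times):
--         # Map light duration to dot or dash
--         if light_duration < light_thresholds[0]:
--             symbols.append('.')  # Dot
--
--         else:
--             symbols.append('-')  # Dash
--
--
--         # Map the corresponding dark duration to spaces, if it exists
--         if i < len(dark_times):
--             dark_duration = dark_times[i]
--             if dark_duration <= dark_thresholds[0]:
--                 continue  # Ignore short gaps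
--             elif dark_duration > dark_thresholds[0] and dark_duration<dark_thresholds[2] :
--                 symbols.append(' ')  # Space between letters
--
--             else:
--                 # Append word space only if it's not at the end of the sequence
--                 if i < len(light_times) - 1:
--                     symbols.append('   ')  # Space between words
--
--
--     return ''.join(symbols).strip()
-- ===== SOURCE B (Python) =====
-- def map_durations_to_morse(light_times, dark_times, light_thresholds, dark_thresholds):
--     # Parse the pulse stream into a words/letters structure (splitting at letter
--     # and word gaps), then render it with nested joins: '' inside a letter, ' '
--     # between letters, '   ' between words.  The hierarchical join makes A's
--     # trailing-gap strip and its last-index word-gap guard unnecessary.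
--     n = len(light_times)
--     words, word, letter = [], [], ''
--     for i in range(n):
--         letter += '.' if light_times[i] < light_thresholds[0] else '-'
--         if i < n - 1 and i < len(dark_times):
--             d = dark_times[i]
--             if d > dark_thresholds[0]:
--                 word.append(letter)
--                 letter = ''
--                 if d >= dark_thresholds[2]:
--                     words.append(word)
--                     word = []
--     word.append(letter)
--     words.append(word)
--     return '   '.join(' '.join(w) for w in words)
-- ===== Notes on version B (the rewrite author's own statement) =====
-- stated objective: alternative
-- what changed: A's flat symbol-appending loop with a last-index word-gap guard and a final strip is replaced by parsing the pulses into a hierarchical words/letters structure (splitting at letter and word gaps) and rendering it with nested joins (' ' between letters, ' ' between words), which makes both the strip and the guard unnecessary.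
import Mathlib
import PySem

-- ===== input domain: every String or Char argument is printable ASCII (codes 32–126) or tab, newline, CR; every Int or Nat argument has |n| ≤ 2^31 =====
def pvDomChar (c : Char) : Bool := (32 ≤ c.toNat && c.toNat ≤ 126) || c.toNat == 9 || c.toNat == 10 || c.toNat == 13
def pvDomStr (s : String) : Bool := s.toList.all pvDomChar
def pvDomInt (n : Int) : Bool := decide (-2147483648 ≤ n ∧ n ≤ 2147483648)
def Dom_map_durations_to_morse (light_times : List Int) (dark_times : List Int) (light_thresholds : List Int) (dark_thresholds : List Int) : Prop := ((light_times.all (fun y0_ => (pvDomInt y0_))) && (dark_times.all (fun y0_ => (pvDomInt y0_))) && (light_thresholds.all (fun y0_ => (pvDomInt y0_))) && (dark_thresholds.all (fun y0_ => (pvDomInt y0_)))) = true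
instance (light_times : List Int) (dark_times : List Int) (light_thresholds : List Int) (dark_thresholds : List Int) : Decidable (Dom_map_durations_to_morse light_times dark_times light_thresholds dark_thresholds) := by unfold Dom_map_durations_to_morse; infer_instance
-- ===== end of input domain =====

-- B parses the pulses into a words/letters structure and renders it with nested
-- joins, replacing A's flat append loop + strip + last-index guard; objective: alternative.

-- ===== PORT A =====
def map_durations_to_morse (light_times : List Int) (dark_times : List Int) (light_thresholds : List Int) (dark_thresholds : List Int) : String :=
  let symbols : List (List Char) :=
    (PySem.List.enumerate light_times).foldl (fun symbols p =>
      let symbols :=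
        if p.2 < PySem.List.pyGetD light_thresholds 0 0 then symbols ++ [['.']]
        else symbols ++ [['-']]
      if p.1 < PySem.List.len dark_times then
        let d := PySem.List.pyGetD dark_times p.1 0
        if d ≤ PySem.List.pyGetD dark_thresholds 0 0 then symbols
        else if PySem.List.pyGetD dark_thresholds 0 0 < d ∧ d < PySem.List.pyGetD dark_thresholds 2 0 then
          symbols ++ [[' ']]
        else if p.1 < PySem.List.len light_times - 1 then symbols ++ [[' ', ' ', ' ']]
        else symbols
      else symbols) []
  String.ofList (PySem.Chars.strip (PySem.Chars.join [] symbols))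

-- ===== PORT B =====
-- one iteration of B's loop body: state = (words, word, letter)
def pvStepB (light_times : List Int) (dark_times : List Int) (light_thresholds : List Int) (dark_thresholds : List Int)
    (st : List (List (List Char)) × List (List Char) × List Char) (i : Nat) :
    List (List (List Char)) × List (List Char) × List Char :=
  let n := light_times.length
  let letter := st.2.2 ++
    (if PySem.List.pyGetD light_times (i : Int) 0 < PySem.List.pyGetD light_thresholds 0 0 then ['.'] else ['-'])
  if i < n - 1 ∧ i < dark_times.length then
    let d := PySem.List.pyGetD dark_times (i : Int) 0
    if PySem.List.pyGetD dark_thresholds 0 0 < d then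
      if PySem.List.pyGetD dark_thresholds 2 0 ≤ d then (st.1 ++ [st.2.1 ++ [letter]], [], [])
      else (st.1, st.2.1 ++ [letter], [])
    else (st.1, st.2.1, letter)
  else (st.1, st.2.1, letter)

def map_durations_to_morse_alt (light_times : List Int) (dark_times : List Int) (light_thresholds : List Int) (dark_thresholds : List Int) : String :=
  let s := (List.range light_times.length).foldl
    (pvStepB light_times dark_times light_thresholds dark_thresholds) ([], [], [])
  String.ofList (List.intercalate [' ', ' ', ' ']
    ((s.1 ++ [s.2.1 ++ [s.2.2]]).map (List.intercalate [' '])))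

-- ===== PRECONDITION & SPEC =====
-- Pre_ excludes exactly the inputs on which the Python A raises IndexError:
-- non-empty light_times with empty light_thresholds, darks present with empty
-- dark_thresholds, or some relevant dark above dark_thresholds[0] while
-- dark_thresholds has fewer than 3 elements.
def Pre_map_durations_to_morse (light_times : List Int) (dark_times : List Int) (light_thresholds : List Int) (dark_thresholds : List Int) : Prop :=
  light_times = [] ∨
    (light_thresholds ≠ [] ∧
     (dark_times = [] ∨ dark_thresholds ≠ []) ∧
     ((∃ d ∈ dark_times.take light_times.length, dark_thresholds.headD 0 < d) → 3 ≤ dark_thresholds.length))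
instance (light_times : List Int) (dark_times : List Int) (light_thresholds : List Int) (dark_thresholds : List Int) : Decidable (Pre_map_durations_to_morse light_times dark_times light_thresholds dark_thresholds) := by unfold Pre_map_durations_to_morse; infer_instance

def pvWitness_map_durations_to_morse : List Int × List Int × List Int × List Int :=
  ([1, 5, 2], [2, 9], [3], [1, 2, 4])

def Spec_map_durations_to_morse (light_times : List Int) (dark_times : List Int) (light_thresholds : List Int) (dark_thresholds : List Int) (out : String) : Prop := out = map_durations_to_morse_alt light_times dark_times light_thresholds dark_thresholds
instance (light_times : List Int) (dark_times : List Int) (light_thresholds : List Int) (dark_thresholds : List Int) (out : String) : Decidable (Spec_map_durations_to_morse light_times dark_times light_thresholds dark_thresholds out) := by unfold Spec_map_durations_to_morse; infer_instance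

-- ===== CLAIM (what is proved, stated in full; the proofs are below) =====
def Claim_equal_map_durations_to_morse : Prop := ∀ (light_times : List Int) (dark_times : List Int) (light_thresholds : List Int) (dark_thresholds : List Int), Dom_map_durations_to_morse light_times dark_times light_thresholds dark_thresholds → Pre_map_durations_to_morse light_times dark_times light_thresholds dark_thresholds → Spec_map_durations_to_morse light_times dark_times light_thresholds dark_thresholds (map_durations_to_morse light_times dark_times light_thresholds dark_thresholds)

-- ===== LEMMAS AND PROOFS =====

-- the dot/dash mark of pulse i and the separator B attaches after pulse i
def pvMark (light_times light_thresholds : List Int) (i : Nat) : List Char :=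
  if PySem.List.pyGetD light_times (i : Int) 0 < PySem.List.pyGetD light_thresholds 0 0 then ['.'] else ['-']

def pvSep (light_times dark_times dark_thresholds : List Int) (i : Nat) : List Char :=
  if i < light_times.length - 1 ∧ i < dark_times.length then
    if PySem.List.pyGetD dark_thresholds 0 0 < PySem.List.pyGetD dark_times (i : Int) 0 then
      if PySem.List.pyGetD dark_thresholds 2 0 ≤ PySem.List.pyGetD dark_times (i : Int) 0 then
        [' ', ' ', ' ']
      else [' ']
    else []
  else []

def pvPieceB (light_times dark_times light_thresholds dark_thresholds : List Int) (k : Nat) : List Char :=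
  pvMark light_times light_thresholds k ++ pvSep light_times dark_times dark_thresholds k

-- the flat string a B state denotes
def pvRender (st : List (List (List Char)) × List (List Char) × List Char) : List Char :=
  List.intercalate [' ', ' ', ' '] ((st.1 ++ [st.2.1 ++ [st.2.2]]).map (List.intercalate [' ']))

-- the list of pieces A's loop body appends for one enumerate pair p = (i, light)
def pvPiecesA (light_thresholds : List Int) (dark_times : List Int) (dark_thresholds : List Int) (nL : Int) (p : Int × Int) : List (List Char) :=
  (if p.2 < PySem.List.pyGetD light_thresholds 0 0 then [['.']] else [['-']]) ++
  (if p.1 < PySem.List.len dark_times then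
     (if PySem.List.pyGetD dark_times p.1 0 ≤ PySem.List.pyGetD dark_thresholds 0 0 then []
      else if PySem.List.pyGetD dark_thresholds 0 0 < PySem.List.pyGetD dark_times p.1 0 ∧
              PySem.List.pyGetD dark_times p.1 0 < PySem.List.pyGetD dark_thresholds 2 0 then [[' ']]
      else if p.1 < nL - 1 then [[' ', ' ', ' ']] else [])
   else [])

def pvPieceA (light_times : List Int) (dark_times : List Int) (light_thresholds : List Int) (dark_thresholds : List Int) (k : Nat) : List Char :=
  (pvPiecesA light_thresholds dark_times dark_thresholds (PySem.List.len light_times)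
    ((k : Int), PySem.List.pyGetD light_times (k : Int) 0)).flatten

lemma pv_join_nil (ps : List (List Char)) : PySem.Chars.join [] ps = ps.flatten := by
  induction ps with
  | nil => rfl
  | cons a t ih =>
    cases t with
    | nil => simp [PySem.Chars.join, List.intercalate]
    | cons b t' =>
      simp only [PySem.Chars.join, List.intercalate, List.intersperse_cons₂] at *
      simp_all

lemma pv_flatten_flatMap {α : Type} (xs : List α) (g : α → List (List Char)) :
    (xs.flatMap g).flatten = xs.flatMap (fun x => (g x).flatten) := by
  induction xs with
  | nil => rfl
  | cons a t ih => simp [List.flatMap_cons, ih]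

lemma pv_rstrip_append (s pad : List Char) (h : ∀ c ∈ pad, PySem.Chars.isspace c = true) :
    PySem.Chars.rstrip (s ++ pad) = PySem.Chars.rstrip s := by
  unfold PySem.Chars.rstrip
  rw [List.reverse_append, List.dropWhile_append]
  have hpad : List.dropWhile PySem.Chars.isspace pad.reverse = [] := by
    rw [List.dropWhile_eq_nil_iff]
    intro c hc; exact h c (List.mem_reverse.mp hc)
  simp [hpad]

lemma pv_strip_append (s pad : List Char) (h : ∀ c ∈ pad, PySem.Chars.isspace c = true) :
    PySem.Chars.strip (s ++ pad) = PySem.Chars.strip s := by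
  unfold PySem.Chars.strip PySem.Chars.lstrip
  rw [List.dropWhile_append]
  have hpad : List.dropWhile PySem.Chars.isspace pad = [] := by
    rw [List.dropWhile_eq_nil_iff]; exact h
  by_cases he : (List.dropWhile PySem.Chars.isspace s).isEmpty = true
  · simp [hpad, List.isEmpty_iff.mp he]
  · simp only [he]
    exact pv_rstrip_append _ _ h

-- A's result as a flatMap over indices
lemma pv_portA_chars (light_times dark_times light_thresholds dark_thresholds : List Int) :
    map_durations_to_morse light_times dark_times light_thresholds dark_thresholds =
      String.ofList (PySem.Chars.strip
        ((List.range light_times.length).flatMap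
          (pvPieceA light_times dark_times light_thresholds dark_thresholds))) := by
  have hstep : (fun (symbols : List (List Char)) (p : Int × Int) =>
      let symbols :=
        if p.2 < PySem.List.pyGetD light_thresholds 0 0 then symbols ++ [['.']]
        else symbols ++ [['-']]
      if p.1 < PySem.List.len dark_times then
        let d := PySem.List.pyGetD dark_times p.1 0
        if d ≤ PySem.List.pyGetD dark_thresholds 0 0 then symbols
        else if PySem.List.pyGetD dark_thresholds 0 0 < d ∧ d < PySem.List.pyGetD dark_thresholds 2 0 then
          symbols ++ [[' ']]
        else if p.1 < PySem.List.len light_times - 1 then symbols ++ [[' ', ' ', ' ']]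
        else symbols
      else symbols) =
      (fun symbols p => symbols ++ pvPiecesA light_thresholds dark_times dark_thresholds (PySem.List.len light_times) p) := by
    funext symbols p
    simp only [pvPiecesA]
    split_ifs <;> simp
  unfold map_durations_to_morse
  dsimp only
  rw [hstep, PySem.List.foldl_append_eq_flatMap, List.nil_append, pv_join_nil,
    pv_flatten_flatMap, PySem.List.enumerate_eq_map_pyRange _ 0]
  have hlen : PySem.List.len light_times = ((light_times.length : Nat) : Int) := rfl
  rw [hlen, PySem.List.pyRange_zero_natCast]
  simp only [List.flatMap_map]
  rfl

-- intercalate facts used to reshape B's nested joins (exact?/simp? found no library names)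
lemma pv_intercalate_cons_cons {α : Type} (sep a b : List α) (t : List (List α)) :
    List.intercalate sep (a :: b :: t) = a ++ sep ++ List.intercalate sep (b :: t) := by
  simp [List.intercalate, List.intersperse_cons₂]

lemma pv_intercalate_last {α : Type} (sep : List α) (xs : List (List α)) (y m : List α) :
    List.intercalate sep (xs ++ [y ++ m]) = List.intercalate sep (xs ++ [y]) ++ m := by
  induction xs with
  | nil => simp [List.intercalate]
  | cons a t ih =>
    cases t with
    | nil => simp [List.intercalate]
    | cons b t' =>
      simp only [List.cons_append, pv_intercalate_cons_cons] at *
      simp [ih]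

lemma pv_intercalate_snoc {α : Type} (sep : List α) (xs : List (List α)) (y : List α) (hx : xs ≠ []) :
    List.intercalate sep (xs ++ [y]) = List.intercalate sep xs ++ sep ++ y := by
  induction xs with
  | nil => exact absurd rfl hx
  | cons a t ih =>
    cases t with
    | nil => simp [List.intercalate]
    | cons b t' =>
      simp only [List.cons_append, pv_intercalate_cons_cons] at *
      simp [ih]

-- one loop step of B appends exactly piece i to the rendered string
lemma pv_stepB_render (light_times dark_times light_thresholds dark_thresholds : List Int)
    (st : List (List (List Char)) × List (List Char) × List Char) (i : Nat) :
    pvRender (pvStepB light_times dark_times light_thresholds dark_thresholds st i) =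
      pvRender st ++ pvPieceB light_times dark_times light_thresholds dark_thresholds i := by
  obtain ⟨ws, w, l⟩ := st
  unfold pvStepB pvPieceB pvMark pvSep pvRender
  dsimp only
  set m : List Char :=
    (if PySem.List.pyGetD light_times (i : Int) 0 < PySem.List.pyGetD light_thresholds 0 0 then ['.'] else ['-']) with hm
  have hbase : ∀ (l' : List Char),
      List.intercalate [' ', ' ', ' '] ((ws ++ [w ++ [l']]).map (List.intercalate [' '])) =
      List.intercalate [' ', ' ', ' '] ((ws.map (List.intercalate [' '])) ++ [List.intercalate [' '] (w ++ [l'])]) := by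
    intro l'; simp
  split_ifs with h1 h2 h3
  · -- word gap
    dsimp only
    have e2 : List.intercalate [' '] (w ++ [l ++ m]) =
        List.intercalate [' '] (w ++ [l]) ++ m := pv_intercalate_last _ _ _ _
    rw [show ws ++ [w ++ [l ++ m]] ++ [[] ++ [[]]] = (ws ++ [w ++ [l ++ m]]) ++ [[([] : List Char)]] from by simp,
      List.map_append, List.map_append, List.map_cons, List.map_nil, List.map_cons, List.map_nil, e2]
    rw [show List.intercalate [' '] [([] : List Char)] = [] from by simp [List.intercalate],
      pv_intercalate_snoc [' ', ' ', ' '] _ _ (by simp),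
      pv_intercalate_last [' ', ' ', ' '] (List.map (List.intercalate [' ']) ws) _ m]
    simp
  · -- letter gap
    dsimp only
    have e2 : List.intercalate [' '] (w ++ [l ++ m] ++ [([] : List Char)]) =
        List.intercalate [' '] (w ++ [l]) ++ (m ++ [' ']) := by
      rw [show w ++ [l ++ m] ++ [([] : List Char)] = (w ++ [l ++ m]) ++ [[]] from by simp,
        pv_intercalate_snoc _ _ _ (by simp), pv_intercalate_last]
      simp
    rw [List.map_append, List.map_cons, List.map_nil, e2,
      pv_intercalate_last [' ', ' ', ' '] (List.map (List.intercalate [' ']) ws) _ (m ++ [' '])]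
    simp
  · -- short gap (ignored)
    dsimp only
    rw [hbase, hbase, pv_intercalate_last [' '] w l m,
      pv_intercalate_last [' ', ' ', ' '] (ws.map (List.intercalate [' '])) _ m]
    simp
  · -- no corresponding dark / last pulse
    dsimp only
    rw [hbase, hbase, pv_intercalate_last [' '] w l m,
      pv_intercalate_last [' ', ' ', ' '] (ws.map (List.intercalate [' '])) _ m]
    simp

-- B's fold renders to the flat concatenation of pieces
lemma pv_foldB (light_times dark_times light_thresholds dark_thresholds : List Int) (k : Nat) :
    pvRender ((List.range k).foldl (pvStepB light_times dark_times light_thresholds dark_thresholds) ([], [], [])) =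
      (List.range k).flatMap (pvPieceB light_times dark_times light_thresholds dark_thresholds) := by
  induction k with
  | zero => simp [pvRender, List.intercalate]
  | succ k ih =>
    rw [List.range_succ, List.foldl_append, List.flatMap_append]
    simp only [List.foldl_cons, List.foldl_nil, List.flatMap_cons, List.flatMap_nil, List.append_nil]
    rw [pv_stepB_render, ih]

lemma pv_portB_chars (light_times dark_times light_thresholds dark_thresholds : List Int) :
    map_durations_to_morse_alt light_times dark_times light_thresholds dark_thresholds =
      String.ofList ((List.range light_times.length).flatMap
        (pvPieceB light_times dark_times light_thresholds dark_thresholds)) := by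
  unfold map_durations_to_morse_alt
  dsimp only
  rw [← pv_foldB]
  rfl

-- B's flat string starts and ends with a mark, so strip is a no-op on it
lemma pv_strip_noop (light_times dark_times light_thresholds dark_thresholds : List Int)
    (hn : 0 < light_times.length) :
    PySem.Chars.strip ((List.range light_times.length).flatMap
      (pvPieceB light_times dark_times light_thresholds dark_thresholds)) =
      (List.range light_times.length).flatMap
        (pvPieceB light_times dark_times light_thresholds dark_thresholds) := by
  obtain ⟨nm, hnm⟩ : ∃ m, light_times.length = m + 1 := ⟨light_times.length - 1, by omega⟩
  -- the first piece starts with a mark character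
  obtain ⟨c0, r0, hp0, hc0⟩ : ∃ c0 r0,
      pvPieceB light_times dark_times light_thresholds dark_thresholds 0 = c0 :: r0 ∧
      PySem.Chars.isspace c0 = false := by
    unfold pvPieceB pvMark
    split_ifs
    · exact ⟨'.', _, rfl, by decide⟩
    · exact ⟨'-', _, rfl, by decide⟩
  -- the last piece is a bare mark character
  obtain ⟨c1, hp1, hc1⟩ : ∃ c1,
      pvPieceB light_times dark_times light_thresholds dark_thresholds nm = [c1] ∧
      PySem.Chars.isspace c1 = false := by
    unfold pvPieceB pvMark pvSep
    have hlast : ¬ (nm < light_times.length - 1 ∧ nm < dark_times.length) := by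
      intro h; omega
    rw [if_neg hlast]
    split_ifs
    · exact ⟨'.', rfl, by decide⟩
    · exact ⟨'-', rfl, by decide⟩
  obtain ⟨rest, hhead⟩ : ∃ rest, (List.range light_times.length).flatMap
      (pvPieceB light_times dark_times light_thresholds dark_thresholds) = c0 :: rest := by
    refine ⟨r0 ++ (List.map Nat.succ (List.range nm)).flatMap
      (pvPieceB light_times dark_times light_thresholds dark_thresholds), ?_⟩
    rw [hnm, List.range_succ_eq_map, List.flatMap_cons, hp0]
    simp
  obtain ⟨pre, htail⟩ : ∃ pre, (List.range light_times.length).flatMap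
      (pvPieceB light_times dark_times light_thresholds dark_thresholds) = pre ++ [c1] := by
    refine ⟨(List.range nm).flatMap
      (pvPieceB light_times dark_times light_thresholds dark_thresholds), ?_⟩
    rw [hnm, List.range_succ, List.flatMap_append, List.flatMap_singleton, hp1]
  unfold PySem.Chars.strip PySem.Chars.lstrip PySem.Chars.rstrip
  rw [hhead, List.dropWhile_cons_of_neg (by simp [hc0]), ← hhead, htail,
    List.reverse_append, List.reverse_singleton, List.singleton_append,
    List.dropWhile_cons_of_neg (by simp [hc1])]
  simp

-- away from the last index A's piece equals B's piece
lemma pv_piece_eq (light_times dark_times light_thresholds dark_thresholds : List Int) (k : Nat)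
    (hk : k + 1 < light_times.length) :
    pvPieceA light_times dark_times light_thresholds dark_thresholds k =
      pvPieceB light_times dark_times light_thresholds dark_thresholds k := by
  unfold pvPieceA pvPieceB pvPiecesA pvMark pvSep PySem.List.len
  dsimp only
  split_ifs <;> first
    | (exfalso; omega)
    | simp

-- at the last index A's piece is B's piece (the bare mark) followed by spaces only
lemma pv_piece_last (light_times dark_times light_thresholds dark_thresholds : List Int) (k : Nat)
    (hk : light_times.length ≤ k + 1) :
    ∃ pad, (∀ c ∈ pad, PySem.Chars.isspace c = true) ∧
      pvPieceA light_times dark_times light_thresholds dark_thresholds k =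
        pvPieceB light_times dark_times light_thresholds dark_thresholds k ++ pad := by
  unfold pvPieceA pvPieceB pvPiecesA pvMark pvSep PySem.List.len
  dsimp only
  have hlastB : ¬ (k < light_times.length - 1 ∧ k < dark_times.length) := by
    intro h; omega
  have hlastA : ¬ ((k : Int) < (light_times.length : Int) - 1) := by omega
  rw [if_neg hlastB]
  by_cases hd : (k : Int) < (dark_times.length : Int)
  · simp only [if_pos hd]
    by_cases h0 : PySem.List.pyGetD dark_times (k : Int) 0 ≤ PySem.List.pyGetD dark_thresholds 0 0
    · refine ⟨[], by simp, ?_⟩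
      simp only [if_pos h0]
      split_ifs <;> rfl
    · by_cases h2 : PySem.List.pyGetD dark_times (k : Int) 0 < PySem.List.pyGetD dark_thresholds 2 0
      · refine ⟨[' '], by simp [PySem.Chars.isspace], ?_⟩
        simp only [if_neg h0]
        split_ifs <;> first | rfl | omega
      · refine ⟨[], by simp, ?_⟩
        have hand : ¬ (PySem.List.pyGetD dark_thresholds 0 0 < PySem.List.pyGetD dark_times (k : Int) 0 ∧
            PySem.List.pyGetD dark_times (k : Int) 0 < PySem.List.pyGetD dark_thresholds 2 0) :=
          fun hc => h2 hc.2
        simp only [if_neg h0, if_neg hand, if_neg hlastA]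
        split_ifs <;> rfl
  · refine ⟨[], by simp, ?_⟩
    simp only [if_neg hd]
    split_ifs <;> rfl

theorem pv_main (light_times dark_times light_thresholds dark_thresholds : List Int) :
    map_durations_to_morse light_times dark_times light_thresholds dark_thresholds =
      map_durations_to_morse_alt light_times dark_times light_thresholds dark_thresholds := by
  rw [pv_portA_chars, pv_portB_chars]
  rcases Nat.eq_zero_or_pos light_times.length with h0 | hpos
  · rw [h0]; simp [PySem.Chars.strip, PySem.Chars.lstrip, PySem.Chars.rstrip]
  · obtain ⟨m, hm⟩ : ∃ m, light_times.length = m + 1 := ⟨light_times.length - 1, by omega⟩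
    congr 1
    have hsplitA : (List.range light_times.length).flatMap
        (pvPieceA light_times dark_times light_thresholds dark_thresholds) =
        (List.range m).flatMap (pvPieceB light_times dark_times light_thresholds dark_thresholds) ++
          pvPieceA light_times dark_times light_thresholds dark_thresholds m := by
      rw [hm, List.range_succ, List.flatMap_append, List.flatMap_singleton]
      congr 1
      rw [List.flatMap_def, List.flatMap_def]
      congr 1
      apply List.map_congr_left
      intro k hkmem
      exact pv_piece_eq _ _ _ _ k (by simp at hkmem; omega)
    obtain ⟨pad, hpad, hlast⟩ :=
      pv_piece_last light_times dark_times light_thresholds dark_thresholds m (by omega)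
    rw [hsplitA, hlast, ← List.append_assoc, pv_strip_append _ _ hpad]
    have hsplitB : (List.range light_times.length).flatMap
        (pvPieceB light_times dark_times light_thresholds dark_thresholds) =
        (List.range m).flatMap (pvPieceB light_times dark_times light_thresholds dark_thresholds) ++
          pvPieceB light_times dark_times light_thresholds dark_thresholds m := by
      rw [hm, List.range_succ, List.flatMap_append, List.flatMap_singleton]
    rw [← hsplitB, pv_strip_noop _ _ _ _ hpos]

-- ===== VERDICT (by name: the statement is the Claim_ definition above) =====
theorem map_durations_to_morse_spec : Claim_equal_map_durations_to_morse := by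
  intro L D lt dts _ _
  unfold Spec_map_durations_to_morse
  exact pv_main L D lt dts
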